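-- pv_equiv track=rewrite | github.com/nathanho19/codingclash2020 | bots/a1/bot.py | vector_to_int
-- ===== SOURCE A (Python) =====
-- def vector_to_int(maxes, vec):
-- 	assert len(maxes) == len(vec)
--
-- 	encoded = 0
-- 	for a, b in zip(maxes, vec):
-- 		assert b <= a
-- 		encoded *= a + 1
-- 		encoded += b
-- 	return encoded
-- ===== SOURCE B (Python) =====
-- def vector_to_int(maxes, vec):
--     assert len(maxes) == len(vec)
--     encoded = 0
--     weight = 1
--     for a, b in reversed(list(zip(maxes, vec))):
--         assert b <= a
--         encoded += b * weight
--         weight *= a + 1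
--     return encoded
-- ===== Notes on version B (the rewrite author's own statement) =====
-- stated objective: alternative
-- what changed: Replaces Horner's left-to-right accumulation (encoded = encoded*(a+1)+b) with a right-to-left pass that keeps an explicit place-value weight and sums digit contributions (encoded += b*weight; weight *= a+1).
import Mathlib
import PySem

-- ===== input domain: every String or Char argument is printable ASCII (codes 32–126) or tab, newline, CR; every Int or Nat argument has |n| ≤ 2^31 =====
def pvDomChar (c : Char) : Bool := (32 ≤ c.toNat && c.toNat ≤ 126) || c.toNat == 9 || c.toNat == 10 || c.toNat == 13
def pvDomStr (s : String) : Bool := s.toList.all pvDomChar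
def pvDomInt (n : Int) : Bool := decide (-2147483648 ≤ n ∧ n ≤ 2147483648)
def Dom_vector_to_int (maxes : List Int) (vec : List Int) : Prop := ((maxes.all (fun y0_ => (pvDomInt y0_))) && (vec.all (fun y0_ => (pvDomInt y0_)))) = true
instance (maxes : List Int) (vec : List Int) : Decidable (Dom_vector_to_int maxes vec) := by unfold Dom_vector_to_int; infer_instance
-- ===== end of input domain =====

-- B replaces A's Horner left-to-right accumulation with a right-to-left pass keeping an explicit place-value weight (alternative decomposition, same cost).


-- ===== PORT A =====
-- Horner scheme: encoded = encoded*(a+1) + b over zip(maxes, vec), left to right.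
def vector_to_int (maxes : List Int) (vec : List Int) : Int :=
  (maxes.zip vec).foldl (fun encoded p => encoded * (p.1 + 1) + p.2) 0

-- ===== PORT B =====
-- Right-to-left pass over reversed(zip): state (encoded, weight); encoded += b*weight; weight *= a+1.
def vector_to_int_alt (maxes : List Int) (vec : List Int) : Int :=
  ((maxes.zip vec).reverse.foldl
    (fun s p => (s.1 + p.2 * s.2, s.2 * (p.1 + 1))) ((0 : Int), (1 : Int))).1

-- ===== PRECONDITION & SPEC =====
-- Pre_ excludes exactly the inputs on which A's asserts fire (AssertionError):
-- mismatched lengths, or some component of vec exceeding its maximum.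
def Pre_vector_to_int (maxes : List Int) (vec : List Int) : Prop :=
  maxes.length = vec.length ∧ ∀ p ∈ maxes.zip vec, p.2 ≤ p.1
instance (maxes : List Int) (vec : List Int) : Decidable (Pre_vector_to_int maxes vec) := by
  unfold Pre_vector_to_int; infer_instance
def pvWitness_vector_to_int : List Int × List Int := ([2, 5, 3], [1, 4, 0])

def Spec_vector_to_int (maxes : List Int) (vec : List Int) (out : Int) : Prop := out = vector_to_int_alt maxes vec
instance (maxes : List Int) (vec : List Int) (out : Int) : Decidable (Spec_vector_to_int maxes vec out) := by unfold Spec_vector_to_int; infer_instance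

-- ===== CLAIM (what is proved, stated in full; the proofs are below) =====
def Claim_equal_vector_to_int : Prop := ∀ (maxes : List Int) (vec : List Int), Dom_vector_to_int maxes vec → Pre_vector_to_int maxes vec → Spec_vector_to_int maxes vec (vector_to_int maxes vec)

-- ===== LEMMAS AND PROOFS =====

-- Horner's accumulation equals acc times the total weight plus the place-value sum.
theorem horner_eq_weighted (l : List (Int × Int)) (acc : Int) :
    l.foldl (fun encoded p => encoded * (p.1 + 1) + p.2) acc =
      acc * (l.foldr (fun p s => (s.1 + p.2 * s.2, s.2 * (p.1 + 1))) ((0 : Int), (1 : Int))).2 +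
        (l.foldr (fun p s => (s.1 + p.2 * s.2, s.2 * (p.1 + 1))) ((0 : Int), (1 : Int))).1 := by
  induction l generalizing acc with
  | nil => simp
  | cons p t ih => simp only [List.foldl_cons, List.foldr_cons]; rw [ih]; ring

theorem vector_to_int_spec : Claim_equal_vector_to_int := by
  intro maxes vec _ _
  unfold Spec_vector_to_int vector_to_int vector_to_int_alt
  rw [List.foldl_reverse, horner_eq_weighted]
  ring
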